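-- pv_equiv track=rewrite | github.com/charkelham/Humanitarian-News-Dashboard | backend/app/services/nlp/topic_data.py | compute_severity
-- ===== SOURCE A (Python) =====
-- from typing import Dict, List, Tuple
--
-- SEVERITY_ESCALATION_RULES = [
--     ({"conflict", "famine"},            "CRITICAL"),
--     ({"conflict", "disease_outbreak"},  "CRITICAL"),
--     ({"displacement", "famine"},        "CRITICAL"),
--     ({"displacement", "disease_outbreak"}, "CRITICAL"),
--     ({"famine", "disease_outbreak"},    "CRITICAL"),
-- ]
--
-- TOPIC_DEFAULT_SEVERITY: Dict[str, str] = {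
--     "conflict":              "HIGH",
--     "displacement":          "HIGH",
--     "famine":                "HIGH",
--     "disease_outbreak":      "MEDIUM",
--     "natural_disaster":      "MEDIUM",
--     "earthquake":            "HIGH",
--     "humanitarian_response": "MEDIUM",
--     "protection":            "MEDIUM",
--     "early_warning":         "LOW",
-- }
--
-- def compute_severity(topic_ids: List[str]) -> str:
--     """
--     Compute article severity from matched topic IDs.
--
--     Checks compound escalation rules first, then falls back
--     to the highest single-topic default.
--
--     Args:
--         topic_ids: List of matched topic IDs
--
--     Returns:
--         Severity string: CRITICAL | HIGH | MEDIUM | LOW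
--     """
--     topic_set = set(topic_ids)
--
--     # Check compound escalation rules
--     for rule_topics, severity in SEVERITY_ESCALATION_RULES:
--         if rule_topics.issubset(topic_set):
--             return severity
--
--     # Fall back to highest single-topic severity
--     order = ["CRITICAL", "HIGH", "MEDIUM", "LOW"]
--     for level in order:
--         for topic in topic_ids:
--             if TOPIC_DEFAULT_SEVERITY.get(topic) == level:
--                 return level
--
--     return "LOW"
-- ===== SOURCE B (Python) =====
-- TOPIC_DEFAULT_SEVERITY = {
--     "conflict":              "HIGH",
--     "displacement":          "HIGH",
--     "famine":                "HIGH",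
--     "disease_outbreak":      "MEDIUM",
--     "natural_disaster":      "MEDIUM",
--     "earthquake":            "HIGH",
--     "humanitarian_response": "MEDIUM",
--     "protection":            "MEDIUM",
--     "early_warning":         "LOW",
-- }
--
-- _CRITICAL_PAIRS = [
--     ("conflict", "famine"),
--     ("conflict", "disease_outbreak"),
--     ("displacement", "famine"),
--     ("displacement", "disease_outbreak"),
--     ("famine", "disease_outbreak"),
-- ]
--
--
-- def _rank(topic):
--     s = TOPIC_DEFAULT_SEVERITY.get(topic)
--     if s == "HIGH":
--         return 2
--     if s == "MEDIUM":
--         return 1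
--     if s == "LOW":
--         return 0
--     return -1
--
--
-- def compute_severity(topic_ids):
--     present = set(topic_ids)
--     for x, y in _CRITICAL_PAIRS:
--         if x in present and y in present:
--             return "CRITICAL"
--     best = -1
--     for t in topic_ids:
--         best = max(best, _rank(t))
--     if best == 2:
--         return "HIGH"
--     if best == 1:
--         return "MEDIUM"
--     return "LOW"
-- ===== Notes on version B (the rewrite author's own statement) =====
-- stated objective: simpler
-- what changed: The fallback's nested order-by-topics scan (one pass over topic_ids per severity level) is replaced by a single pass over topic_ids that tracks the maximum severity rank, translated back to a string at the end.
import Mathlib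
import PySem

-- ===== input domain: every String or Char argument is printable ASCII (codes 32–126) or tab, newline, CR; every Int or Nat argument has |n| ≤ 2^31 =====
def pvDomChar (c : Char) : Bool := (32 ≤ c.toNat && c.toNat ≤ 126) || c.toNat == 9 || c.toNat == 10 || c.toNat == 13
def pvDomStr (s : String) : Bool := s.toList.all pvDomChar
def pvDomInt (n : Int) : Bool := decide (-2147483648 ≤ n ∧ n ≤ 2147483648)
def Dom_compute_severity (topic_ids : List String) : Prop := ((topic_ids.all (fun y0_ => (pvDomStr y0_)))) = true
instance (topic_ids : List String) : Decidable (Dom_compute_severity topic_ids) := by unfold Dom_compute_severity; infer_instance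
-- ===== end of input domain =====

-- B replaces A's nested order×topics fallback with a single pass over topic_ids that
-- tracks the maximum severity rank (objective: simpler).

-- ===== PORT A =====
def pvSeverityRules : List (PySem.Set String × String) :=
  [ (PySem.Set.ofList ["conflict", "famine"],            "CRITICAL"),
    (PySem.Set.ofList ["conflict", "disease_outbreak"],  "CRITICAL"),
    (PySem.Set.ofList ["displacement", "famine"],        "CRITICAL"),
    (PySem.Set.ofList ["displacement", "disease_outbreak"], "CRITICAL"),
    (PySem.Set.ofList ["famine", "disease_outbreak"],    "CRITICAL") ]

def pvTopicDefaultSeverity : PySem.Dict String String :=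
  PySem.Dict.ofList
  [ ("conflict",              "HIGH"),
    ("displacement",          "HIGH"),
    ("famine",                "HIGH"),
    ("disease_outbreak",      "MEDIUM"),
    ("natural_disaster",      "MEDIUM"),
    ("earthquake",            "HIGH"),
    ("humanitarian_response", "MEDIUM"),
    ("protection",            "MEDIUM"),
    ("early_warning",         "LOW") ]

-- the escalation-rules loop of A ('return severity' = some severity)
def pvEscalLoopA : List (PySem.Set String × String) → PySem.Set String → Option String
  | [], _ => none
  | (ruleTopics, severity) :: rest, topicSet =>
      if PySem.Set.issubset ruleTopics topicSet then some severity
      else pvEscalLoopA rest topicSet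

-- the inner 'for topic in topic_ids' loop of A
def pvInnerLoopA (level : String) : List String → Option String
  | [] => none
  | topic :: rest =>
      if PySem.Dict.get? pvTopicDefaultSeverity topic == some level then some level
      else pvInnerLoopA level rest

-- the outer 'for level in order' loop of A
def pvOuterLoopA : List String → List String → Option String
  | [], _ => none
  | level :: levels, topic_ids =>
      match pvInnerLoopA level topic_ids with
      | some r => some r
      | none => pvOuterLoopA levels topic_ids

def compute_severity (topic_ids : List String) : String :=
  match pvEscalLoopA pvSeverityRules (PySem.Set.ofList topic_ids) with
  | some severity => severity
  | none =>
      match pvOuterLoopA ["CRITICAL", "HIGH", "MEDIUM", "LOW"] topic_ids with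
      | some level => level
      | none => "LOW"

-- ===== PORT B =====
def pvCriticalPairs : List (String × String) :=
  [ ("conflict", "famine"),
    ("conflict", "disease_outbreak"),
    ("displacement", "famine"),
    ("displacement", "disease_outbreak"),
    ("famine", "disease_outbreak") ]

-- Source B's _rank (the local 's' inlined)
def pvRank (topic : String) : Int :=
  if PySem.Dict.get? pvTopicDefaultSeverity topic == some "HIGH" then 2
  else if PySem.Dict.get? pvTopicDefaultSeverity topic == some "MEDIUM" then 1
  else if PySem.Dict.get? pvTopicDefaultSeverity topic == some "LOW" then 0
  else -1

def pvPairLoopB : List (String × String) → PySem.Set String → Bool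
  | [], _ => false
  | (x, y) :: rest, present =>
      if PySem.Set.contains present x && PySem.Set.contains present y then true
      else pvPairLoopB rest present

def compute_severity_alt (topic_ids : List String) : String :=
  if pvPairLoopB pvCriticalPairs (PySem.Set.ofList topic_ids) then "CRITICAL"
  else
    if (topic_ids.foldl (fun b t => max b (pvRank t)) (-1)) == 2 then "HIGH"
    else if (topic_ids.foldl (fun b t => max b (pvRank t)) (-1)) == 1 then "MEDIUM"
    else "LOW"

-- ===== PRECONDITION & SPEC =====
def Spec_compute_severity (topic_ids : List String) (out : String) : Prop := out = compute_severity_alt topic_ids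
instance (topic_ids : List String) (out : String) : Decidable (Spec_compute_severity topic_ids out) := by unfold Spec_compute_severity; infer_instance

-- ===== CLAIM (what is proved, stated in full; the proofs are below) =====
def Claim_equal_compute_severity : Prop := ∀ (topic_ids : List String), Dom_compute_severity topic_ids → Spec_compute_severity topic_ids (compute_severity topic_ids)

-- ===== LEMMAS AND PROOFS =====

theorem pvDict_mk : pvTopicDefaultSeverity = PySem.Dict.mk
  [ ("conflict", "HIGH"), ("displacement", "HIGH"), ("famine", "HIGH"),
    ("disease_outbreak", "MEDIUM"), ("natural_disaster", "MEDIUM"), ("earthquake", "HIGH"),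
    ("humanitarian_response", "MEDIUM"), ("protection", "MEDIUM"), ("early_warning", "LOW") ] := by
  decide

-- no topic's default severity is "CRITICAL"
theorem pvGet_ne_critical (t : String) :
    (PySem.Dict.get? pvTopicDefaultSeverity t == some "CRITICAL") = false := by
  rw [pvDict_mk]
  simp only [PySem.Dict.get?_mk_cons]
  split_ifs <;> simp [PySem.Dict.get?]

-- characterisation of the inner loop as an 'any'
theorem pvInner_eq_any (level : String) (ts : List String) :
    pvInnerLoopA level ts =
      if ts.any (fun t => PySem.Dict.get? pvTopicDefaultSeverity t == some level)
      then some level else none := by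
  induction ts with
  | nil => rfl
  | cons t rest ih =>
      by_cases h : (PySem.Dict.get? pvTopicDefaultSeverity t == some level) = true <;>
        simp [pvInnerLoopA, h, ih]

theorem pvRank_two (t : String) :
    (pvRank t = 2) ↔ (PySem.Dict.get? pvTopicDefaultSeverity t == some "HIGH") = true := by
  unfold pvRank; split_ifs <;> simp_all

theorem pvRank_one (t : String) :
    (pvRank t = 1) ↔ (PySem.Dict.get? pvTopicDefaultSeverity t == some "MEDIUM") = true := by
  unfold pvRank; split_ifs <;> simp_all

theorem pvRank_bounds (t : String) : -1 ≤ pvRank t ∧ pvRank t ≤ 2 := by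
  unfold pvRank; split_ifs <;> omega

-- pull the accumulator out of the running-max fold
theorem pvFoldMax_acc (ts : List String) (b c : Int) :
    ts.foldl (fun a t => max a (pvRank t)) (max b c) =
      max b (ts.foldl (fun a t => max a (pvRank t)) c) := by
  induction ts generalizing c with
  | nil => simp
  | cons t rest ih => simp only [List.foldl, max_assoc]; exact ih _

theorem pvBest_cons (t : String) (ts : List String) :
    (t :: ts).foldl (fun a x => max a (pvRank x)) (-1) =
      max (pvRank t) (ts.foldl (fun a x => max a (pvRank x)) (-1)) := by
  have h : max (-1 : Int) (pvRank t) = max (pvRank t) (-1) := max_comm _ _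
  simp only [List.foldl, h, pvFoldMax_acc]

theorem pvBest_bounds (ts : List String) :
    -1 ≤ ts.foldl (fun a x => max a (pvRank x)) (-1) ∧
      ts.foldl (fun a x => max a (pvRank x)) (-1) ≤ 2 := by
  induction ts with
  | nil => simp
  | cons t rest ih =>
      rw [pvBest_cons]
      have := pvRank_bounds t
      constructor
      · exact le_max_of_le_left this.1
      · exact max_le this.2 ih.2

-- the running max is 2 iff some topic has rank 2, and 1 iff none has rank 2 but some has rank 1
theorem pvBest_char (ts : List String) :
    ((ts.foldl (fun a x => max a (pvRank x)) (-1) = 2) ↔ (∃ t ∈ ts, pvRank t = 2)) ∧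
    ((ts.foldl (fun a x => max a (pvRank x)) (-1) = 1) ↔
      ((¬ ∃ t ∈ ts, pvRank t = 2) ∧ ∃ t ∈ ts, pvRank t = 1)) := by
  induction ts with
  | nil => simp
  | cons t rest ih =>
      obtain ⟨ih2, ih1⟩ := ih
      have hb := pvBest_bounds rest
      have ha := pvRank_bounds t
      rw [pvBest_cons]
      by_cases h2 : ∃ x ∈ rest, pvRank x = 2 <;>
        by_cases h1 : ∃ x ∈ rest, pvRank x = 1 <;>
          simp only [List.exists_mem_cons_iff, h2, h1, iff_true, iff_false, or_true, or_false,
            not_true, not_false_iff, and_true, and_false, false_and] at ih2 ih1 ⊢ <;>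
          omega

-- the two escalation loops agree
theorem pvEscal_eq (s : PySem.Set String) :
    pvEscalLoopA pvSeverityRules s =
      (if pvPairLoopB pvCriticalPairs s then some "CRITICAL" else none) := by
  simp only [pvSeverityRules, pvCriticalPairs, pvEscalLoopA, pvPairLoopB,
    PySem.Set.issubset, PySem.Set.ofList, PySem.Set.contains]
  split_ifs <;> simp_all [PySem.Set.add, PySem.Set.empty]

-- ===== VERDICT (by name: the statement is the Claim_ definition above) =====
theorem compute_severity_spec : Claim_equal_compute_severity := by
  intro ts _
  unfold Spec_compute_severity compute_severity compute_severity_alt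
  rw [pvEscal_eq]
  by_cases hc : pvPairLoopB pvCriticalPairs (PySem.Set.ofList ts) = true
  · simp [hc]
  · simp only [hc, if_false, Bool.false_eq_true]
    simp only [pvOuterLoopA, pvInner_eq_any]
    have hcrit : ¬ ∃ x ∈ ts, PySem.Dict.get? pvTopicDefaultSeverity x = some "CRITICAL" := by
      rintro ⟨x, -, hx⟩
      have h := pvGet_ne_critical x
      simp [hx] at h
    obtain ⟨c2, c1⟩ := pvBest_char ts
    have hH : (ts.any (fun t => PySem.Dict.get? pvTopicDefaultSeverity t == some "HIGH") = true)
        ↔ ∃ t ∈ ts, pvRank t = 2 := by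
      simp [List.any_eq_true, pvRank_two]
    have hM : (ts.any (fun t => PySem.Dict.get? pvTopicDefaultSeverity t == some "MEDIUM") = true)
        ↔ ∃ t ∈ ts, pvRank t = 1 := by
      simp [List.any_eq_true, pvRank_one]
    by_cases h2 : ∃ t ∈ ts, pvRank t = 2
    · have : ts.foldl (fun a x => max a (pvRank x)) (-1) = 2 := c2.mpr h2
      simp [hcrit, hH.mpr h2, this]
    · have hHf : ts.any (fun t => PySem.Dict.get? pvTopicDefaultSeverity t == some "HIGH") = false := by
        rw [← Bool.not_eq_true]; exact fun h => h2 (hH.mp h)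
      have hne2 : ts.foldl (fun a x => max a (pvRank x)) (-1) ≠ 2 := fun h => h2 (c2.mp h)
      by_cases h1 : ∃ t ∈ ts, pvRank t = 1
      · have : ts.foldl (fun a x => max a (pvRank x)) (-1) = 1 := c1.mpr ⟨h2, h1⟩
        simp [hcrit, hHf, hM.mpr h1, this]
      · have hMf : ts.any (fun t => PySem.Dict.get? pvTopicDefaultSeverity t == some "MEDIUM") = false := by
          rw [← Bool.not_eq_true]; exact fun h => h1 (hM.mp h)
        have hne1 : ts.foldl (fun a x => max a (pvRank x)) (-1) ≠ 1 := fun h => h1 (c1.mp h).2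
        by_cases hL : ts.any (fun t => PySem.Dict.get? pvTopicDefaultSeverity t == some "LOW") = true <;>
          simp [hcrit, hHf, hMf, hL, hne2, hne1]
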